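-- pv_equiv track=rewrite | github.com/Radcliffe/OEIS-Python | src/oeispy/A260/A260509.py | a_2
-- ===== SOURCE A (Python) =====
-- def a_2(n) :
--     # Output the number of 2-rooted graphs in (a) with n+2 vertices
--     # Formula: \sum_{k=0}^n (\prod_{i=1}^k 2^{i+1}) (\prod_{i=k+1}^n (1 - 2^i))
--     curr_sum = 0
--     for k in range(0,n+1) :
--         curr_prod = 1
--         for i in range(1,k+1) :
--             curr_prod *= (2**(i+1))
--         for i in range(k+1,n+1) :
--             curr_prod *= (1 - (2**i))
--         curr_sum += curr_prod
--     return curr_sum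
-- ===== SOURCE B (Python) =====
-- def a_2(n):
--     # One-pass recurrence: s_m = (1 - 2**m) * s_{m-1} + prod_{i=1}^m 2**(i+1),
--     # maintaining the prefix product p; O(n) multiplications instead of O(n^2).
--     s = 0
--     p = 1
--     for m in range(0, n + 1):
--         if m >= 1:
--             p *= 2 ** (m + 1)
--         s = (1 - 2 ** m) * s + p
--     return s
-- ===== Notes on version B (the rewrite author's own statement) =====
-- stated objective: faster
-- what changed: Replaces the double loop (recomputing both products for every k) by a single forward pass using the recurrence s_m = (1 - 2^m)*s_{m-1} + p_m with a running prefix product p_m; intended as faster (O(n) vs O(n^2) multiplications; a timing run measured B well over 100x faster at the largest size both finished, though for huge inputs both are dominated by bignum growth).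
import Mathlib
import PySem

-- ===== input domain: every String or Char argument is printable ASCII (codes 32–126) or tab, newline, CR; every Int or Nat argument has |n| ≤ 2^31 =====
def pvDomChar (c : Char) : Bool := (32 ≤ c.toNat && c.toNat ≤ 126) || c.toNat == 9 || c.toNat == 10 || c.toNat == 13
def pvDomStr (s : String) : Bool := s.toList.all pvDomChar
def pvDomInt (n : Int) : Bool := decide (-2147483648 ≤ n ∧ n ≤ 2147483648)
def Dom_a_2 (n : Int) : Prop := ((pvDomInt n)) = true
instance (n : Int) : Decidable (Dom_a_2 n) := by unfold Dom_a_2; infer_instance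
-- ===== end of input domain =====

-- B replaces A's double loop by a one-pass recurrence with a running prefix product (O(n) vs O(n^2) multiplications; intended as faster — a timing run measured B well over 100x faster at the largest size both finished, though for huge inputs both are dominated by bignum growth and time out).


-- ===== PORT A =====
-- literal port: outer loop over k, two inner product loops (exponents i+1, i are ≥ 1 on the ranges iterated, so toNat is exact)
def a_2 (n : Int) : Int :=
  (PySem.List.pyRange 0 (n+1) 1).foldl (fun curr_sum k =>
    let p1 := (PySem.List.pyRange 1 (k+1) 1).foldl (fun p i => p * 2 ^ (i+1).toNat) 1
    let p2 := (PySem.List.pyRange (k+1) (n+1) 1).foldl (fun p i => p * (1 - 2 ^ i.toNat)) p1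
    curr_sum + p2) 0

-- ===== PORT B =====
-- literal port of Source B: one fold carrying (s, p)
def a_2_alt (n : Int) : Int :=
  ((PySem.List.pyRange 0 (n+1) 1).foldl (fun (sp : Int × Int) m =>
    let p := if 1 ≤ m then sp.2 * 2 ^ (m+1).toNat else sp.2
    ((1 - 2 ^ m.toNat) * sp.1 + p, p)) (0, 1)).1

-- ===== PRECONDITION & SPEC =====
def Spec_a_2 (n : Int) (out : Int) : Prop := out = a_2_alt n
instance (n : Int) (out : Int) : Decidable (Spec_a_2 n out) := by unfold Spec_a_2; infer_instance

-- ===== CLAIM (what is proved, stated in full; the proofs are below) =====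
def Claim_equal_a_2 : Prop := ∀ (n : Int), Dom_a_2 n → Spec_a_2 n (a_2 n)

-- ===== LEMMAS AND PROOFS =====

-- prefix product  prod_{i=1}^{k} 2^{i+1}
def pvProdA (k : Int) : Int :=
  (PySem.List.pyRange 1 (k+1) 1).foldl (fun p i => p * 2 ^ (i+1).toNat) 1

-- A's summand: prefix product times suffix product up to n
def pvTerm (k n : Int) : Int :=
  (PySem.List.pyRange (k+1) (n+1) 1).foldl (fun p i => p * (1 - 2 ^ i.toNat)) (pvProdA k)

def pvBStep (sp : Int × Int) (m : Int) : Int × Int :=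
  let p := if 1 ≤ m then sp.2 * 2 ^ (m+1).toNat else sp.2
  ((1 - 2 ^ m.toNat) * sp.1 + p, p)

lemma pvBStep_fst (sp : Int × Int) (m : Int) :
    (pvBStep sp m).1 = (1 - 2 ^ m.toNat) * sp.1
      + (if 1 ≤ m then sp.2 * 2 ^ (m+1).toNat else sp.2) := rfl

lemma pvBStep_snd (sp : Int × Int) (m : Int) :
    (pvBStep sp m).2 = (if 1 ≤ m then sp.2 * 2 ^ (m+1).toNat else sp.2) := rfl

lemma a_2_eq (n : Int) :
    a_2 n = (PySem.List.pyRange 0 (n+1) 1).foldl (fun s k => s + pvTerm k n) 0 := rfl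

lemma a_2_alt_eq (n : Int) :
    a_2_alt n = ((PySem.List.pyRange 0 (n+1) 1).foldl pvBStep (0, 1)).1 := rfl

lemma foldl_add_sum (f : Int → Int) (l : List Int) :
    ∀ a : Int, l.foldl (fun s k => s + f k) a = a + (l.map f).sum := by
  induction l with
  | nil => simp
  | cons x xs ih => intro a; simp [List.foldl_cons, ih]; ring

lemma pvProdA_succ (m : Int) (h : 1 ≤ m) :
    pvProdA m = pvProdA (m-1) * 2 ^ (m+1).toNat := by
  unfold pvProdA
  rw [show m + 1 = (m - 1) + 1 + 1 by ring,
      PySem.List.pyRange_one_succ_right (by omega : (1:Int) ≤ m - 1 + 1),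
      List.foldl_append]
  simp only [List.foldl_cons, List.foldl_nil]

lemma pvTerm_succ (k m : Int) (h : k + 1 ≤ m) :
    pvTerm k m = pvTerm k (m-1) * (1 - 2 ^ m.toNat) := by
  unfold pvTerm
  rw [show m + 1 = (m - 1) + 1 + 1 by ring,
      PySem.List.pyRange_one_succ_right (by omega : k + 1 ≤ m - 1 + 1),
      List.foldl_append]
  simp only [List.foldl_cons, List.foldl_nil]
  rw [show m - 1 + 1 = m by ring]

lemma pvTerm_self (m : Int) : pvTerm m m = pvProdA m := by
  unfold pvTerm
  rw [PySem.List.pyRange_one_eq_nil (by omega)]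
  rfl

lemma pvMain (m : Nat) :
    (PySem.List.pyRange 0 (m:Int) 1).foldl (fun s k => s + pvTerm k ((m:Int)-1)) 0
      = ((PySem.List.pyRange 0 (m:Int) 1).foldl pvBStep (0, 1)).1
    ∧ ((PySem.List.pyRange 0 (m:Int) 1).foldl pvBStep (0, 1)).2 = pvProdA ((m:Int)-1) := by
  induction m with
  | zero =>
      constructor
      · simp [PySem.List.pyRange_one_eq_nil]
      · simp [pvProdA, PySem.List.pyRange]
  | succ m ih =>
      obtain ⟨ih1, ih2⟩ := ih
      have hsplit : PySem.List.pyRange 0 ((m:Int)+1) 1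
          = PySem.List.pyRange 0 (m:Int) 1 ++ [(m:Int)] :=
        PySem.List.pyRange_one_succ_right (by exact_mod_cast Int.natCast_nonneg m)
      have hp : (if 1 ≤ (m:Int) then pvProdA ((m:Int)-1) * 2 ^ ((m:Int)+1).toNat
                  else pvProdA ((m:Int)-1)) = pvProdA (m:Int) := by
        by_cases hm : 1 ≤ (m:Int)
        · rw [if_pos hm, ← pvProdA_succ _ hm]
        · have hm0 : (m:Int) = 0 := by omega
          rw [if_neg hm, hm0]
          decide
      have hsum : (PySem.List.pyRange 0 (m:Int) 1).foldl
            (fun s k => s + pvTerm k ((m:Int)+1-1)) 0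
          = (1 - 2 ^ ((m:Int)).toNat) *
            (PySem.List.pyRange 0 (m:Int) 1).foldl (fun s k => s + pvTerm k ((m:Int)-1)) 0 := by
        rw [foldl_add_sum, foldl_add_sum]
        have hmap : (PySem.List.pyRange 0 (m:Int) 1).map (fun k => pvTerm k ((m:Int)+1-1))
            = (PySem.List.pyRange 0 (m:Int) 1).map
                (fun k => pvTerm k ((m:Int)-1) * (1 - 2 ^ ((m:Int)).toNat)) := by
          apply List.map_congr_left
          intro k hk
          rw [PySem.List.mem_pyRange_one] at hk
          rw [show (m:Int)+1-1 = m by ring]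
          exact pvTerm_succ k (m:Int) (by omega)
        rw [hmap]
        rw [show ((PySem.List.pyRange 0 (m:Int) 1).map
              (fun k => pvTerm k ((m:Int)-1) * (1 - 2 ^ ((m:Int)).toNat))).sum
            = ((PySem.List.pyRange 0 (m:Int) 1).map (fun k => pvTerm k ((m:Int)-1))).sum
              * (1 - 2 ^ ((m:Int)).toNat) from by
          rw [← List.sum_map_mul_right]]
        ring
      push_cast
      rw [hsplit]
      rw [List.foldl_append, List.foldl_append]
      simp only [List.foldl_cons, List.foldl_nil]
      constructor
      · show _ + pvTerm (m:Int) ((m:Int)+1-1) = _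
        rw [show (m:Int)+1-1 = (m:Int) by ring] at *
        have : (PySem.List.pyRange 0 (m:Int) 1).foldl (fun s k => s + pvTerm k (m:Int)) 0
            = (1 - 2 ^ ((m:Int)).toNat) *
              (PySem.List.pyRange 0 (m:Int) 1).foldl (fun s k => s + pvTerm k ((m:Int)-1)) 0 := by
          rw [show (m:Int) = (m:Int)+1-1 by ring] at hsum ⊢
          exact hsum
        rw [this, ih1, pvTerm_self, pvBStep_fst, ih2, hp]
      · show (pvBStep _ (m:Int)).2 = _
        rw [pvBStep_snd, ih2, hp, show (m:Int)+1-1 = (m:Int) by ring]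

-- ===== VERDICT (by name: the statement is the Claim_ definition above) =====
theorem a_2_spec : Claim_equal_a_2 := by
  intro n _
  show a_2 n = a_2_alt n
  rw [a_2_eq, a_2_alt_eq]
  by_cases h : n + 1 ≤ 0
  · rw [PySem.List.pyRange_one_eq_nil (by omega)]
    rfl
  · have hn : 0 ≤ n := by omega
    obtain ⟨m, hm⟩ := Int.eq_ofNat_of_zero_le (show (0:Int) ≤ n + 1 by omega)
    have := pvMain m
    rw [← hm] at this
    rw [show n + 1 - 1 = n by ring] at this
    exact this.1
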